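-- pv_equiv track=rewrite | github.com/pypi-data/pypi-mirror-269 | packages/rentalUtility/rentalUtility-0.1.0-py3-none-any.whl/rentCalculations/calculate.py | calculate_rent
-- ===== SOURCE A (Python) =====
-- def calculate_rent(first_month_rent, subsequent_month_rent, num_of_months):
--     total_rent = 0
--     deposit = first_month_rent
--     for month in range(1, num_of_months + 1):
--         if month == 1:
--             total_rent += first_month_rent
--         else:
--             total_rent += subsequent_month_rent
--     total_rent += deposit
--     return total_rent
-- ===== SOURCE B (Python) =====
-- def calculate_rent(first_month_rent, subsequent_month_rent, num_of_months):
--     # Closed form: deposit (= first month's rent) plus first month's rent if any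
--     # month is rented, plus subsequent rent for the remaining months.
--     if num_of_months <= 0:
--         return first_month_rent
--     return 2 * first_month_rent + (num_of_months - 1) * subsequent_month_rent
-- ===== Notes on version B (the rewrite author's own statement) =====
-- stated objective: faster
-- what changed: Replaced the month-by-month loop with a closed-form arithmetic formula (deposit + first month + (n-1) subsequent months), with the n<=0 case returning just the deposit.
import Mathlib
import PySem

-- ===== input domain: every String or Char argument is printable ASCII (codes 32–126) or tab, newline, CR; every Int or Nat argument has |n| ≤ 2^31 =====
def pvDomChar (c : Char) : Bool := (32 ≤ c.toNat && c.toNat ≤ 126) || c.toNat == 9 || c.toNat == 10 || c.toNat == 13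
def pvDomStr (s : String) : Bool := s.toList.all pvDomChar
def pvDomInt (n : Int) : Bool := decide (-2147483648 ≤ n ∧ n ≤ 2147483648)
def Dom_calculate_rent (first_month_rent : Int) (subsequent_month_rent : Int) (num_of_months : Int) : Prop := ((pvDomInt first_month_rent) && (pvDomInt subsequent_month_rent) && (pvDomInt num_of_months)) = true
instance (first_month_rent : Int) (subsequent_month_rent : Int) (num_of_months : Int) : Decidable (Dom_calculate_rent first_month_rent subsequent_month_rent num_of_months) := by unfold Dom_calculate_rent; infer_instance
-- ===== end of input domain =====

-- B replaces A's month-by-month loop with a closed-form O(1) formula (objective: faster).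

-- ===== PORT A =====
def calculate_rent (first_month_rent : Int) (subsequent_month_rent : Int) (num_of_months : Int) : Int :=
  let total_rent : Int := 0
  let deposit := first_month_rent
  let total_rent :=
    (PySem.List.pyRange 1 (num_of_months + 1) 1).foldl
      (fun t month => if month == 1 then t + first_month_rent else t + subsequent_month_rent)
      total_rent
  let total_rent := total_rent + deposit
  total_rent

-- ===== PORT B =====
def calculate_rent_alt (first_month_rent : Int) (subsequent_month_rent : Int) (num_of_months : Int) : Int :=
  if num_of_months ≤ 0 then first_month_rent
  else 2 * first_month_rent + (num_of_months - 1) * subsequent_month_rent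

-- ===== PRECONDITION & SPEC =====
def Spec_calculate_rent (first_month_rent : Int) (subsequent_month_rent : Int) (num_of_months : Int) (out : Int) : Prop := out = calculate_rent_alt first_month_rent subsequent_month_rent num_of_months
instance (first_month_rent : Int) (subsequent_month_rent : Int) (num_of_months : Int) (out : Int) : Decidable (Spec_calculate_rent first_month_rent subsequent_month_rent num_of_months out) := by unfold Spec_calculate_rent; infer_instance

-- ===== CLAIM (what is proved, stated in full; the proofs are below) =====
def Claim_equal_calculate_rent : Prop := ∀ (first_month_rent : Int) (subsequent_month_rent : Int) (num_of_months : Int), Dom_calculate_rent first_month_rent subsequent_month_rent num_of_months → Spec_calculate_rent first_month_rent subsequent_month_rent num_of_months (calculate_rent first_month_rent subsequent_month_rent num_of_months)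

-- ===== LEMMAS AND PROOFS =====

-- Folding A's loop body over a range that starts at 2 or later adds subsequent rent once per element.
lemma foldl_tail (f s : Int) : ∀ (k : Nat) (a t : Int), 2 ≤ a →
    (PySem.List.pyRange a (a + k) 1).foldl
      (fun t month => if month == 1 then t + f else t + s) t = t + s * k := by
  intro k
  induction k with
  | zero =>
    intro a t _
    rw [PySem.List.pyRange_one_eq_nil (by omega)]
    simp
  | succ k ih =>
    intro a t ha
    rw [PySem.List.pyRange_one_cons (by omega)]
    simp only [List.foldl_cons]
    have hne : (a == (1 : Int)) = false := by simp; omega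
    rw [hne]
    simp only [Bool.false_eq_true, if_false]
    have harg : a + ((k + 1 : Nat) : Int) = (a + 1) + (k : Int) := by push_cast; ring
    rw [harg, ih (a + 1) (t + s) (by omega)]
    push_cast
    ring

theorem calculate_rent_spec : Claim_equal_calculate_rent := by
  intro f s n _
  unfold Spec_calculate_rent calculate_rent calculate_rent_alt
  by_cases h : n ≤ 0
  · rw [PySem.List.pyRange_one_eq_nil (by omega)]
    simp [h]
  · rw [PySem.List.pyRange_one_cons (by omega)]
    simp only [List.foldl_cons, BEq.rfl, if_true]
    have h11 : (1 : Int) + 1 = 2 := rfl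
    have hk : n + 1 = 2 + ((n - 1).toNat : Int) := by omega
    rw [h11, hk, foldl_tail f s (n - 1).toNat 2 (0 + f) (by omega)]
    rw [if_neg h]
    have : ((n - 1).toNat : Int) = n - 1 := by omega
    rw [this]
    ring
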